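-- pv_equiv track=rewrite | github.com/green-fox-academy/nicolas-todo-app | functions.py | row_parser
-- ===== SOURCE A (Python) =====
-- def row_parser(row, indicator_symbol):
--     updated_row = ""
--     indicator = False
--     for char in row:
--         if char == indicator_symbol:
--             indicator = True
--         if indicator:
--             updated_row = updated_row + char
--     return updated_row
-- ===== SOURCE B (Python) =====
-- def row_parser(row, indicator_symbol):
--     idx = next((i for i, c in enumerate(row) if c == indicator_symbol), -1)
--     return row[idx:] if idx != -1 else ""
-- ===== Notes on version B (the rewrite author's own statement) =====
-- stated objective: simpler
-- what changed: Replaces the flag-and-accumulate loop with locate-the-first-matching-character then one slice, keeping the per-character equality test so empty/multi-char symbols still yield "".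
import Mathlib
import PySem

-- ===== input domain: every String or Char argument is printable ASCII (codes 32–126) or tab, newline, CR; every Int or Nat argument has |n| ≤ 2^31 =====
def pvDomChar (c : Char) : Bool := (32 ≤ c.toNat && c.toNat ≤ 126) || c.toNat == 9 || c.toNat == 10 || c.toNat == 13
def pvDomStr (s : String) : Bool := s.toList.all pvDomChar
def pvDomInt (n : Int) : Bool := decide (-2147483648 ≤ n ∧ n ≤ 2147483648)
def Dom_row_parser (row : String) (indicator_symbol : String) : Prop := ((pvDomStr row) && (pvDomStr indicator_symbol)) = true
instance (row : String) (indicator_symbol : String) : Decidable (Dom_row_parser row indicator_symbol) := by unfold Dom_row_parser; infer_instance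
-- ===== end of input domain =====

-- B replaces A's flag-and-accumulate loop by locating the first matching character and slicing; objective: simpler.


-- ===== PORT A =====
-- for char in row: if char == indicator_symbol: indicator = True; if indicator: updated_row += char
def row_parser (row : String) (indicator_symbol : String) : String :=
  (row.toList.foldl
    (fun (st : String × Bool) (char : Char) =>
      let indicator := if String.singleton char = indicator_symbol then true else st.2
      (if indicator then st.1 ++ String.singleton char else st.1, indicator))
    ("", false)).1

-- ===== PORT B =====
-- idx = next((i for i, c in enumerate(row) if c == indicator_symbol), -1); row[idx:] if idx != -1 else ""
def row_parser_alt (row : String) (indicator_symbol : String) : String :=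
  match row.toList.findIdx? (fun c => String.singleton c = indicator_symbol) with
  | some i => String.ofList (PySem.List.slice row.toList (some (i : Int)) none)
  | none => ""

-- ===== PRECONDITION & SPEC =====
def Spec_row_parser (row : String) (indicator_symbol : String) (out : String) : Prop := out = row_parser_alt row indicator_symbol
instance (row : String) (indicator_symbol : String) (out : String) : Decidable (Spec_row_parser row indicator_symbol out) := by unfold Spec_row_parser; infer_instance

-- ===== CLAIM (what is proved, stated in full; the proofs are below) =====
def Claim_equal_row_parser : Prop := ∀ (row : String) (indicator_symbol : String), Dom_row_parser row indicator_symbol → Spec_row_parser row indicator_symbol (row_parser row indicator_symbol)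

-- ===== LEMMAS AND PROOFS =====

theorem rp_mk_cons (c : Char) (t : List Char) :
    String.singleton c ++ String.ofList t = String.ofList (c :: t) := by
  apply String.toList_injective; simp

theorem rp_loop_true (sym : String) (l : List Char) (acc : String) :
    (l.foldl
      (fun (st : String × Bool) (char : Char) =>
        let indicator := if String.singleton char = sym then true else st.2
        (if indicator then st.1 ++ String.singleton char else st.1, indicator))
      (acc, true)) = (acc ++ String.ofList l, true) := by
  induction l generalizing acc with
  | nil => apply Prod.ext <;> [apply String.toList_injective; skip] <;> simp
  | cons c t ih =>
      simp only [List.foldl_cons, if_pos, ite_self]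
      rw [ih]
      rw [String.append_assoc, rp_mk_cons]

theorem rp_loop_false (sym : String) (l : List Char) (acc : String) :
    (l.foldl
      (fun (st : String × Bool) (char : Char) =>
        let indicator := if String.singleton char = sym then true else st.2
        (if indicator then st.1 ++ String.singleton char else st.1, indicator))
      (acc, false)).1 =
    (match l.findIdx? (fun c => String.singleton c = sym) with
     | some i => acc ++ String.ofList (l.drop i)
     | none => acc) := by
  induction l generalizing acc with
  | nil => simp
  | cons c t ih =>
      by_cases h : String.singleton c = sym
      · simp only [List.foldl_cons, if_pos h, List.findIdx?_cons, decide_eq_true h]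
        simp only [if_true]
        rw [rp_loop_true, String.append_assoc, rp_mk_cons]
        simp
      · simp only [List.foldl_cons, if_neg h, List.findIdx?_cons, decide_eq_false h]
        simp only [if_false, Bool.false_eq_true]
        rw [ih]
        cases t.findIdx? (fun x => String.singleton x = sym) <;> simp

-- ===== VERDICT (by name: the statement is the Claim_ definition above) =====
theorem row_parser_spec : Claim_equal_row_parser := by
  intro row sym _
  unfold Spec_row_parser row_parser row_parser_alt
  rw [rp_loop_false]
  cases hf : row.toList.findIdx? (fun c => String.singleton c = sym) with
  | none => simp
  | some i =>
      simp only [PySem.List.slice_from_natCast]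
      apply String.toList_injective; simp
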